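-- pv_equiv track=rewrite | github.com/tr0up2r/coding-test | website/programmers/level1/165_report.py | solution
-- ===== SOURCE A (Python) =====
-- def solution(id_list, report, k):
--     reported_dict, user_dict = dict(), dict()
--
--     for id in id_list:
--         reported_dict[id] = set()
--         user_dict[id] = 0
--
--     for r in report:
--         user, reported_user = r.split()
--         reported_dict[reported_user].add(user)
--
--     for id in id_list:
--         if len(reported_dict[id]) >= k:
--             for u in reported_dict[id]:
--                 user_dict[u] += 1
--
--     return list(user_dict.values())
-- ===== SOURCE B (Python) =====
-- def solution(id_list, report, k):
--     pairs = {tuple(r.split()) for r in report}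
--     cnt = {}
--     for _, t in pairs:
--         cnt[t] = cnt.get(t, 0) + 1
--     hot = [i for i in id_list if cnt.get(i, 0) >= k]
--     return [sum((u, i) in pairs for i in hot) for u in dict.fromkeys(id_list)]
-- ===== Notes on version B (the rewrite author's own statement) =====
-- stated objective: alternative
-- what changed: A pushes credit target-by-target: it keeps a set of reporters per reported user and, for each id over threshold, walks that set bumping a mutable result dict; B pulls the answer user-by-user: it dedups the parsed pairs once, counts distinct reporters per target, lists the over-threshold targets, and computes each user's tally directly as the number of hot targets that user reported, with no mutable result dict.
import Mathlib
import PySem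

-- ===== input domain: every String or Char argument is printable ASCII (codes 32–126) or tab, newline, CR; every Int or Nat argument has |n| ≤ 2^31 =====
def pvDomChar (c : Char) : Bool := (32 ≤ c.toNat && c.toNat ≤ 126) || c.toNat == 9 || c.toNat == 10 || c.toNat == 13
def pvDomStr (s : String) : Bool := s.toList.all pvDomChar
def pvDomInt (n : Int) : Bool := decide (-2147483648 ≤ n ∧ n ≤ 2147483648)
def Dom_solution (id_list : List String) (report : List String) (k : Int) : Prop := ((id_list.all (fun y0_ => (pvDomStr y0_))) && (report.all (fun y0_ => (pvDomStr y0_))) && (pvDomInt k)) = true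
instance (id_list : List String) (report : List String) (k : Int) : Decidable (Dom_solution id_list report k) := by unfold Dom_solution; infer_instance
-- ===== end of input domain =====

-- B replaces A's push-style tally (per-target reporter sets, then a nested loop bumping a mutable
-- result dict) by a pull-style one: dedup the parsed pairs, count distinct reporters per target,
-- list the over-threshold targets, and read off each user's tally as the number of those targets
-- that user reported (objective: alternative).

-- `r.split()` and unpacking of its two words, shared by both ports (both Pythons split each line)
def pvParse (r : String) : String × String :=
  let ws := PySem.Str.split₀ r
  (ws.getD 0 "", ws.getD 1 "")

-- ===== PORT A =====
def solution (id_list : List String) (report : List String) (k : Int) : List Int :=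
  -- reported_dict, user_dict = dict(), dict(); for id in id_list: reported_dict[id] = set(); user_dict[id] = 0
  let inits :=
    id_list.foldl
      (fun (d : PySem.Dict String (PySem.Set String) × PySem.Dict String Int) i =>
        (d.1.insert i PySem.Set.empty, d.2.insert i 0))
      (PySem.Dict.empty, PySem.Dict.empty)
  -- for r in report: user, reported_user = r.split(); reported_dict[reported_user].add(user)
  let reported :=
    report.foldl
      (fun d r => d.modify (pvParse r).2 PySem.Set.empty (fun s => PySem.Set.add s (pvParse r).1))
      inits.1
  -- for id in id_list: if len(reported_dict[id]) >= k: for u in reported_dict[id]: user_dict[u] += 1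
  let user :=
    id_list.foldl
      (fun d i =>
        if k ≤ ((reported.getD i PySem.Set.empty).length : Int) then
          (reported.getD i PySem.Set.empty).foldl (fun d' u => d'.modify u 0 (· + 1)) d
        else d)
      inits.2
  -- return list(user_dict.values())
  user.values

-- ===== PORT B =====
def solution_alt (id_list : List String) (report : List String) (k : Int) : List Int :=
  -- pairs = {tuple(r.split()) for r in report}
  let pairs : PySem.Set (String × String) := PySem.Set.ofList (report.map pvParse)
  -- cnt = {}; for _, t in pairs: cnt[t] = cnt.get(t, 0) + 1
  let cnt : PySem.Dict String Int :=
    pairs.foldl (fun d p => d.modify p.2 0 (· + 1)) PySem.Dict.empty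
  -- hot = [i for i in id_list if cnt.get(i, 0) >= k]
  let hot := id_list.filter (fun i => decide (k ≤ cnt.getD i 0))
  -- return [sum((u, i) in pairs for i in hot) for u in dict.fromkeys(id_list)]
  (PySem.List.dedup id_list).map (fun u => (hot.countP (fun i => PySem.Set.contains pairs (u, i)) : Int))

-- ===== PRECONDITION & SPEC =====
-- Pre_ excludes exactly the inputs on which A raises: a report line that does not split into two
-- words (ValueError on unpacking), a reported user not in id_list (KeyError on reported_dict), or
-- an over-threshold reporter not in id_list (KeyError on user_dict at tally time).
def Pre_solution (id_list : List String) (report : List String) (k : Int) : Prop :=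
  (∀ r ∈ report, (PySem.Str.split₀ r).length = 2 ∧ (PySem.Str.split₀ r).getD 1 "" ∈ id_list) ∧
  (∀ r ∈ report,
    k ≤ ((PySem.List.dedup (report.map (fun r' =>
            ((PySem.Str.split₀ r').getD 0 "", (PySem.Str.split₀ r').getD 1 "")))).countP
          (fun p => p.2 == (PySem.Str.split₀ r).getD 1 "") : Int) →
      (PySem.Str.split₀ r).getD 0 "" ∈ id_list)
instance (id_list : List String) (report : List String) (k : Int) : Decidable (Pre_solution id_list report k) := by unfold Pre_solution; infer_instance

def pvWitness_solution : List String × List String × Int := (["muzi", "frodo"], ["muzi frodo", "frodo muzi"], 1)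

def Spec_solution (id_list : List String) (report : List String) (k : Int) (out : List Int) : Prop := out = solution_alt id_list report k
instance (id_list : List String) (report : List String) (k : Int) (out : List Int) : Decidable (Spec_solution id_list report k out) := by unfold Spec_solution; infer_instance

-- ===== CLAIM (what is proved, stated in full; the proofs are below) =====
def Claim_equal_solution : Prop := ∀ (id_list : List String) (report : List String) (k : Int), Dom_solution id_list report k → Pre_solution id_list report k → Spec_solution id_list report k (solution id_list report k)

-- ===== LEMMAS AND PROOFS =====

-- the parsed report pairs and their dedup (B's `pairs`)
def pvP (report : List String) : List (String × String) := report.map pvParse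
def pvPairs (report : List String) : PySem.Set (String × String) := PySem.Set.ofList (pvP report)
-- A's reporter set for a reported user i
def pvS (report : List String) (i : String) : PySem.Set String :=
  PySem.Set.ofList (((pvP report).filter (fun p => p.2 == i)).map (·.1))
-- B's report count for a reported user i
def pvCnt (report : List String) (i : String) : Nat :=
  List.count i ((pvPairs report).map (·.2))

lemma pv_mem_pairs (report : List String) (p : String × String) :
    p ∈ pvPairs report ↔ p ∈ pvP report := by
  simp [pvPairs, PySem.Set.mem_ofList]

lemma pv_mem_S (report : List String) (i u : String) :
    u ∈ pvS report i ↔ (u, i) ∈ pvP report := by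
  constructor
  · intro h
    rcases (PySem.Set.mem_ofList _ _).1 h with h
    rcases List.mem_map.1 h with ⟨p, hp, rfl⟩
    rcases List.mem_filter.1 hp with ⟨hpP, hpi⟩
    have : p.2 = i := by simpa using hpi
    simpa [← this] using hpP
  · intro h
    exact (PySem.Set.mem_ofList _ _).2 (List.mem_map.2 ⟨(u, i), List.mem_filter.2 ⟨h, by simp⟩, rfl⟩)

lemma pv_len_S (report : List String) (i : String) :
    (pvS report i).length = pvCnt report i := by
  have hR : pvCnt report i = (((pvPairs report).filter (fun p => p.2 == i)).map (·.1)).length := by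
    rw [pvCnt, List.count_eq_countP, List.countP_map, List.length_map,
      ← List.countP_eq_length_filter]
    rfl
  have hnd2 : ((((pvPairs report).filter (fun p => p.2 == i))).map (·.1)).Nodup := by
    refine List.Nodup.map_on ?_ ((PySem.Set.nodup_ofList _).filter _)
    intro x hx y hy hxy
    have hx2 : x.2 = i := by simpa using (List.mem_filter.1 hx).2
    have hy2 : y.2 = i := by simpa using (List.mem_filter.1 hy).2
    exact Prod.ext hxy (hx2.trans hy2.symm)
  have hperm : (pvS report i).Perm ((((pvPairs report).filter (fun p => p.2 == i))).map (·.1)) := by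
    refine (List.perm_ext_iff_of_nodup ?_ hnd2).2 ?_
    · exact PySem.Set.nodup_ofList _
    intro u
    rw [pv_mem_S]
    constructor
    · intro h
      exact List.mem_map.2 ⟨(u, i), List.mem_filter.2 ⟨(pv_mem_pairs report _).2 h, by simp⟩, rfl⟩
    · intro h
      rcases List.mem_map.1 h with ⟨p, hp, rfl⟩
      rcases List.mem_filter.1 hp with ⟨hpp, hpi⟩
      have h2 : p.2 = i := by simpa using hpi
      have hm : p ∈ pvP report := (pv_mem_pairs report p).1 hpp
      have : (p.1, p.2) ∈ pvP report := by simpa using hm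
      rw [← h2]; exact this
  rw [hperm.length_eq, hR]

-- initial dict {i: v for i in ids} looks up to v everywhere (value and default coincide)
lemma pv_getD_insert_const {ν : Type} (ids : List String) (v : ν) (d : PySem.Dict String ν) (x : String)
    (h : d.getD x v = v) :
    (ids.foldl (fun d i => d.insert i v) d).getD x v = v := by
  induction ids generalizing d with
  | nil => simpa using h
  | cons i ids ih =>
      refine ih _ ?_
      by_cases hx : x = i
      · simp [hx, PySem.Dict.getD_insert_self]
      · simpa [PySem.Dict.getD_insert d i x v v, hx] using h

-- keys of {i: v for i in ids} are the distinct ids in first-occurrence order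
lemma pv_keys_init {ν : Type} (ids : List String) (v : ν) :
    (ids.foldl (fun d i => d.insert i v) PySem.Dict.empty).keys = PySem.Set.ofList ids := by
  rw [PySem.Dict.keys_foldl_insert ids (fun _ _ => v) PySem.Dict.empty,
    PySem.Dict.keys_empty, PySem.Set.update_nil_left]

-- A's report loop: the set stored at i collects the reporters whose report targets i
lemma pv_reported_getD (l : List (String × String)) (d : PySem.Dict String (PySem.Set String)) (i : String) :
    (l.foldl (fun d p => d.modify p.2 PySem.Set.empty (fun s => PySem.Set.add s p.1)) d).getD i PySem.Set.empty
      = PySem.Set.update (d.getD i PySem.Set.empty) ((l.filter (fun p => p.2 == i)).map (·.1)) := by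
  induction l generalizing d with
  | nil => simp [PySem.Set.update]
  | cons p l ih =>
      by_cases hp : p.2 = i
      · simp only [List.foldl_cons, ih, List.filter_cons, hp, beq_self_eq_true, if_pos, List.map_cons]
        rw [PySem.Dict.getD_modify]
        simp [PySem.Set.update_cons]
      · simp only [List.foldl_cons, ih, List.filter_cons]
        rw [PySem.Dict.getD_modify]
        simp [Ne.symm hp, hp]

-- A's tally loop: each id occurrence over threshold contributes its set's count of u
lemma pv_outer (ids : List String) (R : PySem.Dict String (PySem.Set String)) (k : Int)
    (d : PySem.Dict String Int) (u : String) :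
    (ids.foldl
      (fun d i =>
        if k ≤ ((R.getD i PySem.Set.empty).length : Int) then
          (R.getD i PySem.Set.empty).foldl (fun d' x => d'.modify x 0 (· + 1)) d
        else d) d).getD u 0
    = d.getD u 0 +
      (ids.map (fun i =>
        if k ≤ ((R.getD i PySem.Set.empty).length : Int)
        then ((R.getD i PySem.Set.empty).count u : Int) else 0)).sum := by
  induction ids generalizing d with
  | nil => simp
  | cons i ids ih =>
      rw [List.foldl_cons, List.map_cons, List.sum_cons]
      by_cases hc : k ≤ ((R.getD i PySem.Set.empty).length : Int)
      · rw [if_pos hc, if_pos hc, ih, PySem.Dict.getD_foldl_modify_add_one]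
        ring
      · rw [if_neg hc, if_neg hc, ih]
        ring

-- update by an already-contained list is the identity
lemma pv_update_of_subset (s : PySem.Set String) (xs : List String) (h : ∀ x ∈ xs, x ∈ s) :
    PySem.Set.update s xs = s := by
  rw [PySem.Set.update_eq_append_filter]
  have hf : List.filter (fun y => !s.contains y) (PySem.Set.ofList xs) = [] := by
    refine List.filter_eq_nil_iff.2 ?_
    intro y hy
    have hys : y ∈ s := h y ((PySem.Set.mem_ofList _ _).1 hy)
    simpa using hys
  rw [hf, List.append_nil]

-- A's tally loop only touches keys already present
lemma pv_outer_keys (ids : List String) (R : PySem.Dict String (PySem.Set String)) (k : Int)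
    (d : PySem.Dict String Int)
    (h : ∀ i ∈ ids, k ≤ ((R.getD i PySem.Set.empty).length : Int) →
      ∀ x ∈ R.getD i PySem.Set.empty, x ∈ d.keys) :
    (ids.foldl
      (fun d i =>
        if k ≤ ((R.getD i PySem.Set.empty).length : Int) then
          (R.getD i PySem.Set.empty).foldl (fun d' x => d'.modify x 0 (· + 1)) d
        else d) d).keys = d.keys := by
  induction ids generalizing d with
  | nil => rfl
  | cons i ids ih =>
      rw [List.foldl_cons]
      by_cases hc : k ≤ ((R.getD i PySem.Set.empty).length : Int)
      · have hk : ((R.getD i PySem.Set.empty).foldl (fun d' x => d'.modify x 0 (· + 1)) d).keys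
            = d.keys := by
          rw [PySem.Dict.keys_foldl_modify]
          exact pv_update_of_subset _ _ (h i (List.mem_cons_self) hc)
        rw [if_pos hc,
          ih _ (fun j hj hjk x hx => by rw [hk]; exact h j (List.mem_cons_of_mem _ hj) hjk x hx), hk]
      · rw [if_neg hc]
        exact ih _ (fun j hj hjk x hx => h j (List.mem_cons_of_mem _ hj) hjk x hx)

-- the count expression written out inside Pre_ is pvCnt
lemma pv_cnt_inline (report : List String) (i : String) :
    ((PySem.List.dedup (report.map (fun r' =>
        ((PySem.Str.split₀ r').getD 0 "", (PySem.Str.split₀ r').getD 1 "")))).countP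
      (fun p => p.2 == i) : Int) = (pvCnt report i : Int) := by
  have h0 : (report.map (fun r' =>
      ((PySem.Str.split₀ r').getD 0 "", (PySem.Str.split₀ r').getD 1 ""))) = pvP report := rfl
  rw [h0, PySem.List.dedup_eq_ofList]
  unfold pvCnt
  rw [List.count_eq_countP, List.countP_map]
  rfl

-- A's result: over the distinct ids u, sum over id occurrences i over threshold of [u ∈ S_i]
lemma pv_A_values (id_list report : List String) (k : Int)
    (hP1 : ∀ p ∈ pvP report, k ≤ (pvCnt report p.2 : Int) → p.1 ∈ id_list) :
    solution id_list report k
      = (PySem.Set.ofList id_list).map (fun u =>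
          (id_list.map (fun i =>
            if k ≤ ((pvS report i).length : Int) then ((pvS report i).count u : Int) else 0)).sum) := by
  have hfst : (id_list.foldl (fun (d : PySem.Dict String (PySem.Set String) × PySem.Dict String Int) i => (d.1.insert i PySem.Set.empty, d.2.insert i 0)) (PySem.Dict.empty, PySem.Dict.empty)).1 = id_list.foldl (fun d i => d.insert i PySem.Set.empty) (PySem.Dict.empty : PySem.Dict String (PySem.Set String)) :=
    congrArg Prod.fst (PySem.List.foldl_prod_mk
      (fun (x : PySem.Dict String (PySem.Set String)) i => x.insert i PySem.Set.empty)
      (fun (x : PySem.Dict String Int) i => x.insert i 0)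
      id_list PySem.Dict.empty PySem.Dict.empty)
  have hsnd : (id_list.foldl (fun (d : PySem.Dict String (PySem.Set String) × PySem.Dict String Int) i => (d.1.insert i PySem.Set.empty, d.2.insert i 0)) (PySem.Dict.empty, PySem.Dict.empty)).2 = id_list.foldl (fun d i => d.insert i 0) (PySem.Dict.empty : PySem.Dict String Int) :=
    congrArg Prod.snd (PySem.List.foldl_prod_mk
      (fun (x : PySem.Dict String (PySem.Set String)) i => x.insert i PySem.Set.empty)
      (fun (x : PySem.Dict String Int) i => x.insert i 0)
      id_list PySem.Dict.empty PySem.Dict.empty)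
  show (id_list.foldl
      (fun d i =>
        if k ≤ (((report.foldl (fun d r => d.modify (pvParse r).2 PySem.Set.empty (fun s => PySem.Set.add s (pvParse r).1)) ((id_list.foldl (fun (d : PySem.Dict String (PySem.Set String) × PySem.Dict String Int) i => (d.1.insert i PySem.Set.empty, d.2.insert i 0)) (PySem.Dict.empty, PySem.Dict.empty)).1)).getD i PySem.Set.empty).length : Int) then
          ((report.foldl (fun d r => d.modify (pvParse r).2 PySem.Set.empty (fun s => PySem.Set.add s (pvParse r).1)) ((id_list.foldl (fun (d : PySem.Dict String (PySem.Set String) × PySem.Dict String Int) i => (d.1.insert i PySem.Set.empty, d.2.insert i 0)) (PySem.Dict.empty, PySem.Dict.empty)).1)).getD i PySem.Set.empty).foldl (fun d' x => d'.modify x 0 (· + 1)) d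
        else d) ((id_list.foldl (fun (d : PySem.Dict String (PySem.Set String) × PySem.Dict String Int) i => (d.1.insert i PySem.Set.empty, d.2.insert i 0)) (PySem.Dict.empty, PySem.Dict.empty)).2)).values = _
  rw [hfst, hsnd]
  have hgetD0 : ∀ x : String, (id_list.foldl (fun d i => d.insert i 0) (PySem.Dict.empty : PySem.Dict String Int)).getD x 0 = 0 := fun x =>
    pv_getD_insert_const id_list 0 PySem.Dict.empty x (by simp)
  have hkeys0 : (id_list.foldl (fun d i => d.insert i 0) (PySem.Dict.empty : PySem.Dict String Int)).keys = PySem.Set.ofList id_list := pv_keys_init id_list 0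
  have hRA : ∀ i, (report.foldl (fun d r => d.modify (pvParse r).2 PySem.Set.empty (fun s => PySem.Set.add s (pvParse r).1)) (id_list.foldl (fun d i => d.insert i PySem.Set.empty) (PySem.Dict.empty : PySem.Dict String (PySem.Set String)))).getD i PySem.Set.empty = pvS report i := by
    intro i
    have h1 : report.foldl (fun d r => d.modify (pvParse r).2 PySem.Set.empty (fun s => PySem.Set.add s (pvParse r).1)) (id_list.foldl (fun d i => d.insert i PySem.Set.empty) (PySem.Dict.empty : PySem.Dict String (PySem.Set String))) = (pvP report).foldl
        (fun d p => d.modify p.2 PySem.Set.empty (fun s => PySem.Set.add s p.1)) (id_list.foldl (fun d i => d.insert i PySem.Set.empty) (PySem.Dict.empty : PySem.Dict String (PySem.Set String))) :=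
      (List.foldl_map (f := pvParse)
        (g := fun d p => d.modify p.2 PySem.Set.empty (fun s => PySem.Set.add s p.1))
        (l := report) (init := id_list.foldl (fun d i => d.insert i PySem.Set.empty) (PySem.Dict.empty : PySem.Dict String (PySem.Set String)))).symm
    have h2 : (id_list.foldl (fun d i => d.insert i PySem.Set.empty) (PySem.Dict.empty : PySem.Dict String (PySem.Set String))).getD i PySem.Set.empty = PySem.Set.empty :=
      pv_getD_insert_const id_list PySem.Set.empty PySem.Dict.empty i (by simp)
    rw [h1, pv_reported_getD, h2]
    simpa [pvS, pvP] using
      PySem.Set.update_nil_left (((pvP report).filter (fun p => p.2 == i)).map (·.1))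
  have hmemkeys : ∀ i ∈ id_list,
      k ≤ (((report.foldl (fun d r => d.modify (pvParse r).2 PySem.Set.empty (fun s => PySem.Set.add s (pvParse r).1)) (id_list.foldl (fun d i => d.insert i PySem.Set.empty) (PySem.Dict.empty : PySem.Dict String (PySem.Set String)))).getD i PySem.Set.empty).length : Int) →
      ∀ x ∈ (report.foldl (fun d r => d.modify (pvParse r).2 PySem.Set.empty (fun s => PySem.Set.add s (pvParse r).1)) (id_list.foldl (fun d i => d.insert i PySem.Set.empty) (PySem.Dict.empty : PySem.Dict String (PySem.Set String)))).getD i PySem.Set.empty, x ∈ (id_list.foldl (fun d i => d.insert i 0) (PySem.Dict.empty : PySem.Dict String Int)).keys := by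
    intro i _ hk x hx
    rw [hRA i] at hx hk
    rw [hkeys0]
    refine (PySem.Set.mem_ofList _ _).2 (hP1 (x, i) ((pv_mem_S report i x).1 hx) ?_)
    rw [pv_len_S] at hk
    exact hk
  have hkeysU : (id_list.foldl
      (fun d i =>
        if k ≤ (((report.foldl (fun d r => d.modify (pvParse r).2 PySem.Set.empty (fun s => PySem.Set.add s (pvParse r).1)) (id_list.foldl (fun d i => d.insert i PySem.Set.empty) (PySem.Dict.empty : PySem.Dict String (PySem.Set String)))).getD i PySem.Set.empty).length : Int) then
          ((report.foldl (fun d r => d.modify (pvParse r).2 PySem.Set.empty (fun s => PySem.Set.add s (pvParse r).1)) (id_list.foldl (fun d i => d.insert i PySem.Set.empty) (PySem.Dict.empty : PySem.Dict String (PySem.Set String)))).getD i PySem.Set.empty).foldl (fun d' x => d'.modify x 0 (· + 1)) d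
        else d) (id_list.foldl (fun d i => d.insert i 0) (PySem.Dict.empty : PySem.Dict String Int))).keys = PySem.Set.ofList id_list := by
    rw [pv_outer_keys id_list (report.foldl (fun d r => d.modify (pvParse r).2 PySem.Set.empty (fun s => PySem.Set.add s (pvParse r).1)) (id_list.foldl (fun d i => d.insert i PySem.Set.empty) (PySem.Dict.empty : PySem.Dict String (PySem.Set String)))) k (id_list.foldl (fun d i => d.insert i 0) (PySem.Dict.empty : PySem.Dict String Int)) hmemkeys, hkeys0]
  rw [PySem.Dict.values_eq_map_keys _ (by rw [hkeysU]; exact PySem.Set.nodup_ofList _) 0, hkeysU]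
  refine List.map_congr_left ?_
  intro u _
  rw [pv_outer id_list (report.foldl (fun d r => d.modify (pvParse r).2 PySem.Set.empty (fun s => PySem.Set.add s (pvParse r).1)) (id_list.foldl (fun d i => d.insert i PySem.Set.empty) (PySem.Dict.empty : PySem.Dict String (PySem.Set String)))) k (id_list.foldl (fun d i => d.insert i 0) (PySem.Dict.empty : PySem.Dict String Int)) u, hgetD0 u, zero_add]
  refine congrArg List.sum (List.map_congr_left ?_)
  intro i _
  rw [hRA i]

-- B's result: over the distinct ids u, the number of hot id occurrences that u reported
set_option maxHeartbeats 1000000 in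
lemma pv_B_values (id_list report : List String) (k : Int) :
    solution_alt id_list report k
      = (PySem.Set.ofList id_list).map (fun u =>
          ((id_list.filter (fun i => decide (k ≤ (pvCnt report i : Int)))).countP
            (fun i => decide ((u, i) ∈ pvPairs report)) : Int)) := by
  have hC : ∀ x, ((pvPairs report).foldl (fun d p => d.modify p.2 0 (· + 1)) PySem.Dict.empty).getD x 0 = (pvCnt report x : Int) := by
    intro x
    rw [← List.foldl_map (f := fun (p : String × String) => p.2)
      (g := fun (d : PySem.Dict String Int) y => d.modify y 0 (· + 1))]
    simpa [PySem.Dict.counter, pvCnt] using PySem.Dict.getD_counter ((pvPairs report).map (·.2)) x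
  show (PySem.List.dedup id_list).map (fun u =>
      ((id_list.filter (fun i => decide (k ≤ ((pvPairs report).foldl (fun d p => d.modify p.2 0 (· + 1)) PySem.Dict.empty).getD i 0))).countP
        (fun i => PySem.Set.contains (pvPairs report) (u, i)) : Int)) = _
  rw [PySem.List.dedup_eq_ofList]
  refine List.map_congr_left ?_
  intro u _
  have hfilter : id_list.filter (fun i => decide (k ≤ ((pvPairs report).foldl (fun d p => d.modify p.2 0 (· + 1)) PySem.Dict.empty).getD i 0))
      = id_list.filter (fun i => decide (k ≤ (pvCnt report i : Int))) := by
    refine List.filter_congr ?_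
    intro i _
    rw [hC i]
  rw [hfilter]
  refine congrArg _ (List.countP_congr ?_)
  intro i _
  simp [PySem.Set.contains]

-- ===== VERDICT (by name: the statement is the Claim_ definition above) =====
theorem solution_spec : Claim_equal_solution := by
  intro id_list report k _ hpre
  obtain ⟨hrep2, hrep1⟩ := hpre
  have hP1 : ∀ p ∈ pvP report, k ≤ (pvCnt report p.2 : Int) → p.1 ∈ id_list := by
    intro p hp hk
    rcases List.mem_map.1 hp with ⟨r, hr, rfl⟩
    have h := hrep1 r hr
    rw [pv_cnt_inline report ((PySem.Str.split₀ r).getD 1 "")] at h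
    simpa [pvParse] using h (by simpa [pvParse] using hk)
  show solution id_list report k = solution_alt id_list report k
  rw [pv_A_values id_list report k hP1, pv_B_values id_list report k]
  refine List.map_congr_left ?_
  intro u _
  have hstep : ∀ i ∈ id_list,
      (if k ≤ ((pvS report i).length : Int) then ((pvS report i).count u : Int) else 0)
      = if (decide (k ≤ (pvCnt report i : Int)) && decide ((u, i) ∈ pvPairs report)) = true
        then (1 : Int) else 0 := by
    intro i _
    rw [pv_len_S]
    by_cases h1 : k ≤ (pvCnt report i : Int)
    · by_cases h2 : u ∈ pvS report i
      · have hm : (u, i) ∈ pvPairs report :=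
          (pv_mem_pairs report _).2 ((pv_mem_S report i u).1 h2)
        rw [if_pos h1, List.count_eq_one_of_mem (show (pvS report i).Nodup from PySem.Set.nodup_ofList _) h2]
        simp [h1, hm]
      · have hni : (u, i) ∉ pvPairs report := fun hm =>
          h2 ((pv_mem_S report i u).2 ((pv_mem_pairs report _).1 hm))
        rw [if_pos h1, List.count_eq_zero.2 h2]
        simp [hni]
    · rw [if_neg h1]
      simp [h1]
  have hcomm : List.countP (fun i => decide ((u, i) ∈ pvPairs report) && decide (k ≤ (pvCnt report i : Int))) id_list
      = List.countP (fun i => decide (k ≤ (pvCnt report i : Int)) && decide ((u, i) ∈ pvPairs report)) id_list :=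
    List.countP_congr (fun i _ => by rw [Bool.and_comm])
  rw [List.map_congr_left hstep, PySem.List.sum_map_ite_one_zero, List.countP_filter, hcomm]
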